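-- pv_equiv track=rewrite | github.com/aitsaadachakib/RCR | RCRTP4.py | get_preprocessed_formulas
-- ===== SOURCE A (Python) =====
-- def get_preprocessed_formulas(sub_formulas):
--     dict_cor = {}
--     returned_formulas = []
--     cpt = 1
--     i = 0
--     for form in sub_formulas:
--         j = 0
--         returned_formulas.insert(i, [])
--         for pred in form:
--             if pred not in dict_cor.keys():
--                 if pred > 0:
--                     dict_cor[pred] = cpt
--                     dict_cor[-pred] = -cpt
--                     cpt += 1
--                 else:
--                     dict_cor[-pred] = cpt
--                     dict_cor[pred] = -cpt
--                     cpt += 1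
--             returned_formulas[i].insert(j, dict_cor[pred])
--             j += 1
--         i += 1
--     return returned_formulas
-- ===== SOURCE B (Python) =====
-- def get_preprocessed_formulas(sub_formulas):
--     # Pass 1: build the renaming map in encounter order (same +/- sign rule as the original).
--     dict_cor = {}
--     cpt = 1
--     for form in sub_formulas:
--         for pred in form:
--             if pred not in dict_cor:
--                 dict_cor[abs(pred)] = cpt
--                 dict_cor[-abs(pred)] = -cpt
--                 cpt += 1
--     # Pass 2: apply the finished map.
--     return [[dict_cor[p] for p in form] for form in sub_formulas]
-- ===== Notes on version B (the rewrite author's own statement) =====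
-- stated objective: alternative
-- what changed: A renames predicates in one interleaved loop that extends the mapping and emits output together (with index-tracking inserts); B first makes a full pass building the sign-aware mapping dict in encounter order, then applies it in a separate nested comprehension.
import Mathlib
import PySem

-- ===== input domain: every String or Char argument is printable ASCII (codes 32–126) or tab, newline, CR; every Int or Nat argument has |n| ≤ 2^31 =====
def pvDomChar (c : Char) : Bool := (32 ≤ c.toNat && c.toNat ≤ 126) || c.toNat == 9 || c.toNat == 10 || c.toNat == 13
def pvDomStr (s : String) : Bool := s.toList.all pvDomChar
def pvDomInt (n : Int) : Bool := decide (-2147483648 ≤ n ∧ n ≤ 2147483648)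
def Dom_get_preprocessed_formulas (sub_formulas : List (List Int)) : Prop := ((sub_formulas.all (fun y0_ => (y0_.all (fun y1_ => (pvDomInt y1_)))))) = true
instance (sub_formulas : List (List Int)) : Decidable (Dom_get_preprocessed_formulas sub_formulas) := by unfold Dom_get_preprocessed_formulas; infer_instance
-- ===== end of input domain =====

-- B separates A's single interleaved rename loop into a build-the-mapping pass followed by an apply pass (return value identical; A mutates nothing observable).


-- ===== PORT A =====
-- inner loop body over one `pred`; state = (dict_cor, cpt, the row returned_formulas[i], j).
-- `dict_cor[pred]` is read right after the conditional insertion, so the key is always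
-- present and `(get? …).getD 0` is exact (KeyError is unreachable).
-- `returned_formulas[i].insert(j, v)` is ported as PySem.List.insert on the current row.
def pvA_pred (st : PySem.Dict Int Int × Int × List Int × Int) (pred : Int) :
    PySem.Dict Int Int × Int × List Int × Int :=
  match st with
  | (d, cpt, row, j) =>
    let dc : PySem.Dict Int Int × Int :=
      if d.contains pred = false then
        if pred > 0 then
          ((d.insert pred cpt).insert (-pred) (-cpt), cpt + 1)
        else
          ((d.insert (-pred) cpt).insert pred (-cpt), cpt + 1)
      else (d, cpt)
    (dc.1, dc.2, PySem.List.insert row j ((dc.1.get? pred).getD 0), j + 1)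

-- outer loop body over one `form`; state = (dict_cor, cpt, returned_formulas, i).
-- `returned_formulas.insert(i, [])` then filling slot i in place = PySem.List.insert + List.set.
def pvA_form (st : PySem.Dict Int Int × Int × List (List Int) × Int) (form : List Int) :
    PySem.Dict Int Int × Int × List (List Int) × Int :=
  match st with
  | (d, cpt, ret, i) =>
    let ret1 := PySem.List.insert ret i ([] : List Int)
    let r := form.foldl pvA_pred (d, cpt, ([] : List Int), (0 : Int))
    (r.1, r.2.1, ret1.set i.toNat r.2.2.1, i + 1)

def get_preprocessed_formulas (sub_formulas : List (List Int)) : List (List Int) :=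
  (sub_formulas.foldl pvA_form (PySem.Dict.empty, 1, ([] : List (List Int)), (0 : Int))).2.2.1

-- ===== PORT B =====
-- pass 1 body: conditionally extend the mapping (abs-based sign rule), state = (dict_cor, cpt)
def pvB_build (st : PySem.Dict Int Int × Int) (pred : Int) : PySem.Dict Int Int × Int :=
  if st.1.contains pred = false then
    ((st.1.insert |pred| st.2).insert (-|pred|) (-st.2), st.2 + 1)
  else st

-- pass 2: nested comprehension applying the finished map; `dict_cor[p]` with the key
-- always present (pass 1 saw every p), so `(get? …).getD 0` is exact.
def get_preprocessed_formulas_alt (sub_formulas : List (List Int)) : List (List Int) :=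
  let dc := (sub_formulas.foldl (fun st form => form.foldl pvB_build st) (PySem.Dict.empty, 1)).1
  sub_formulas.map (fun form => form.map (fun p => (dc.get? p).getD 0))

-- ===== PRECONDITION & SPEC =====
def Spec_get_preprocessed_formulas (sub_formulas : List (List Int)) (out : List (List Int)) : Prop := out = get_preprocessed_formulas_alt sub_formulas
instance (sub_formulas : List (List Int)) (out : List (List Int)) : Decidable (Spec_get_preprocessed_formulas sub_formulas out) := by unfold Spec_get_preprocessed_formulas; infer_instance

-- ===== CLAIM (what is proved, stated in full; the proofs are below) =====
def Claim_equal_get_preprocessed_formulas : Prop := ∀ (sub_formulas : List (List Int)), Dom_get_preprocessed_formulas sub_formulas → Spec_get_preprocessed_formulas sub_formulas (get_preprocessed_formulas sub_formulas)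

-- ===== LEMMAS AND PROOFS =====

-- invariant: keys always come in ± pairs
def pvDInv (d : PySem.Dict Int Int) : Prop :=
  ∀ x : Int, (d.get? x).isSome = (d.get? (-x)).isSome

theorem pv_ins2_isSome (d : PySem.Dict Int Int) (a b v w x : Int) :
    (((d.insert a v).insert b w).get? x).isSome
      = ((d.get? x).isSome || decide (x = a) || decide (x = b)) := by
  simp only [PySem.Dict.get?_insert]
  split_ifs <;> simp_all

theorem pvA_pred_dict (d : PySem.Dict Int Int) (cpt : Int) (row : List Int) (j pred : Int) :
    ((pvA_pred (d, cpt, row, j) pred).1, (pvA_pred (d, cpt, row, j) pred).2.1)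
      = pvB_build (d, cpt) pred := by
  simp only [pvA_pred, pvB_build]
  by_cases h : d.contains pred = false
  · by_cases hp : pred > 0
    · simp [h, hp, abs_of_pos hp]
    · have : pred ≤ 0 := by omega
      simp [h, hp, abs_of_nonpos this]
  · simp [h]

theorem pvB_build_inv (d : PySem.Dict Int Int) (c pred : Int) (hI : pvDInv d) :
    pvDInv (pvB_build (d, c) pred).1 := by
  unfold pvB_build
  by_cases h : d.contains pred = false
  · intro x
    simp only [if_pos h]
    rw [pv_ins2_isSome, pv_ins2_isSome, hI x]
    have e1 : decide (x = |pred|) = decide (-x = -|pred|) :=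
      decide_eq_decide.mpr (by omega)
    have e2 : decide (x = -|pred|) = decide (-x = |pred|) :=
      decide_eq_decide.mpr (by omega)
    rw [e1, e2]
    ac_rfl
  · simpa [h] using hI

theorem pvB_build_mono (d : PySem.Dict Int Int) (c pred k : Int) (v : Int)
    (hI : pvDInv d) (hk : d.get? k = some v) :
    (pvB_build (d, c) pred).1.get? k = some v := by
  unfold pvB_build
  by_cases h : d.contains pred = false
  · have hpn : d.get? pred = none := by
      rw [PySem.Dict.get?_eq_none_iff_contains]; exact h
    have habs : d.get? |pred| = none ∧ d.get? (-|pred|) = none := by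
      rcases abs_choice pred with h1 | h1
      · constructor
        · rw [h1]; exact hpn
        · have hthis := hI pred
          rw [hpn] at hthis
          rw [h1]
          cases hmn : d.get? (-pred) with
          | none => rfl
          | some w => rw [hmn] at hthis; simp at hthis
      · constructor
        · have hthis := hI pred
          rw [hpn] at hthis
          rw [h1]
          cases hmn : d.get? (-pred) with
          | none => rfl
          | some w => rw [hmn] at hthis; simp at hthis
        · simp [h1, hpn]
    have hk1 : k ≠ |pred| := fun he => by rw [he, habs.1] at hk; cases hk
    have hk2 : k ≠ -|pred| := fun he => by rw [he, habs.2] at hk; cases hk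
    simp [h, PySem.Dict.get?_insert_of_ne _ _ hk2, PySem.Dict.get?_insert_of_ne _ _ hk1, hk]
  · simpa [h] using hk

theorem pvB_build_mem (d : PySem.Dict Int Int) (c pred : Int) :
    ((pvB_build (d, c) pred).1.get? pred).isSome := by
  unfold pvB_build
  by_cases h : d.contains pred = false
  · simp only [if_pos h]
    rw [pv_ins2_isSome]
    have habs : decide (pred = |pred|) = true ∨ decide (pred = -|pred|) = true := by
      rcases abs_choice pred with h1 | h1
      · left; simp [h1]
      · right; simp; omega
    rcases habs with h1 | h1 <;> simp [h1]
  · simp only [if_neg h]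
    rw [← PySem.Dict.contains_eq_isSome_get?]
    simp at h; simp [h]

-- fold (one form) versions
theorem pvB_fold_inv (form : List Int) :
    ∀ d c, pvDInv d → pvDInv (form.foldl pvB_build (d, c)).1 := by
  induction form with
  | nil => intro d c h; simpa using h
  | cons p form ih =>
    intro d c h
    have h1 := pvB_build_inv d c p h
    simpa using ih (pvB_build (d, c) p).1 (pvB_build (d, c) p).2 h1

theorem pvB_fold_mono (form : List Int) :
    ∀ d c k v, pvDInv d → d.get? k = some v →
      (form.foldl pvB_build (d, c)).1.get? k = some v := by
  induction form with
  | nil => intro d c k v _ hk; simpa using hk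
  | cons p form ih =>
    intro d c k v h hk
    have h1 := pvB_build_inv d c p h
    have h2 := pvB_build_mono d c p k v h hk
    simpa using ih (pvB_build (d, c) p).1 (pvB_build (d, c) p).2 k v h1 h2

theorem pvB_fold_mem (form : List Int) :
    ∀ d c p, pvDInv d → p ∈ form → ((form.foldl pvB_build (d, c)).1.get? p).isSome := by
  induction form with
  | nil => intro d c p _ h; cases h
  | cons q form ih =>
    intro d c p h hm
    have h1 := pvB_build_inv d c q h
    rcases List.mem_cons.mp hm with rfl | hm
    · obtain ⟨v, hv⟩ := Option.isSome_iff_exists.mp (pvB_build_mem d c p)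
      have := pvB_fold_mono form (pvB_build (d, c) p).1 (pvB_build (d, c) p).2 p v h1 hv
      simp [this]
    · simpa using ih (pvB_build (d, c) q).1 (pvB_build (d, c) q).2 p h1 hm

-- forms-level fold of B's pass 1
theorem pvB_foldAll_mono (forms : List (List Int)) :
    ∀ d c k v, pvDInv d → d.get? k = some v →
      (forms.foldl (fun st form => form.foldl pvB_build st) (d, c)).1.get? k = some v := by
  induction forms with
  | nil => intro d c k v _ hk; simpa using hk
  | cons f forms ih =>
    intro d c k v h hk
    have h1 := pvB_fold_inv f d c h
    have h2 := pvB_fold_mono f d c k v h hk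
    simpa using ih (f.foldl pvB_build (d, c)).1 (f.foldl pvB_build (d, c)).2 k v h1 h2

-- A's inner loop = B's pass-1 fold over this form, plus the row mapped under the resulting dict
theorem pvA_inner_eq (form : List Int) :
    ∀ d c (row : List Int), pvDInv d →
      form.foldl pvA_pred (d, c, row, (row.length : Int)) =
        ((form.foldl pvB_build (d, c)).1, (form.foldl pvB_build (d, c)).2,
         row ++ form.map (fun p => ((form.foldl pvB_build (d, c)).1.get? p).getD 0),
         (row.length : Int) + form.length) := by
  induction form with
  | nil => intro d c row _; simp
  | cons p form ih =>
    intro d c row hI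
    have hstep := pvA_pred_dict d c row (row.length : Int) p
    have h1 := congrArg Prod.fst hstep
    have h2 := congrArg Prod.snd hstep
    simp only at h1 h2
    obtain ⟨v, hv⟩ := Option.isSome_iff_exists.mp (pvB_build_mem d c p)
    have hI1 := pvB_build_inv d c p hI
    have hmono := pvB_fold_mono form (pvB_build (d, c) p).1 (pvB_build (d, c) p).2 p v hI1 hv
    have hrow : (pvA_pred (d, c, row, (row.length : Int)) p).2.2.1 = row ++ [v] := by
      show PySem.List.insert row (row.length : Int)
          (((pvA_pred (d, c, row, (row.length : Int)) p).1.get? p).getD 0) = row ++ [v]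
      rw [h1, hv]
      exact PySem.List.insert_len row v
    have hj : (pvA_pred (d, c, row, (row.length : Int)) p).2.2.2
        = ((row ++ [v]).length : Int) := by
      show (row.length : Int) + 1 = ((row ++ [v]).length : Int)
      simp
    have hA : pvA_pred (d, c, row, (row.length : Int)) p
        = ((pvB_build (d, c) p).1, (pvB_build (d, c) p).2,
           row ++ [v], ((row ++ [v]).length : Int)) :=
      Prod.ext h1 (Prod.ext h2 (Prod.ext hrow hj))
    rw [List.foldl_cons, hA,
        ih (pvB_build (d, c) p).1 (pvB_build (d, c) p).2 (row ++ [v]) hI1]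
    have hlook : ((form.foldl pvB_build (pvB_build (d, c) p)).1.get? p).getD 0 = v := by
      cases hpb : pvB_build (d, c) p with
      | mk d1 c1 => rw [hpb] at hmono; simp [hmono]
    refine Prod.ext (by simp) (Prod.ext (by simp) (Prod.ext ?_ ?_))
    · simp only [List.foldl_cons, List.map_cons]
      rw [List.append_assoc]
      simp only [List.singleton_append]
      rw [hlook]
    · simp only [List.length_append, List.length_cons, List.length_nil]
      push_cast
      ring

-- helper: setting the freshly appended slot
theorem pv_set_append (l : List (List Int)) (r : List Int) :
    (l ++ [([] : List Int)]).set l.length r = l ++ [r] := by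
  induction l with
  | nil => rfl
  | cons x l ih => simp [ih]

-- A's outer loop = append of the rows mapped under B's final dict
theorem pvA_outer_eq (forms : List (List Int)) :
    ∀ d c (ret : List (List Int)), pvDInv d →
      (forms.foldl pvA_form (d, c, ret, (ret.length : Int))).2.2.1 =
        ret ++ forms.map (fun f => f.map (fun p =>
          (((forms.foldl (fun st form => form.foldl pvB_build st) (d, c)).1.get? p)).getD 0)) := by
  induction forms with
  | nil => intro d c ret _; simp
  | cons f forms ih =>
    intro d c ret hI
    have hins : PySem.List.insert ret (ret.length : Int) ([] : List Int) = ret ++ [[]] :=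
      PySem.List.insert_len ret ([] : List Int)
    have hinner := pvA_inner_eq f d c [] hI
    simp only [List.length_nil, Int.natCast_zero] at hinner
    have hform : pvA_form (d, c, ret, (ret.length : Int)) f
        = ((f.foldl pvB_build (d, c)).1, (f.foldl pvB_build (d, c)).2,
           ret ++ [f.map (fun p => ((f.foldl pvB_build (d, c)).1.get? p).getD 0)],
           ((ret ++ [f.map (fun p => ((f.foldl pvB_build (d, c)).1.get? p).getD 0)]).length : Int)) := by
      simp only [pvA_form, hins, hinner]
      have htn : ((ret.length : Int)).toNat = ret.length := by simp
      rw [htn, pv_set_append]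
      simp
    have hI1 := pvB_fold_inv f d c hI
    rw [List.foldl_cons, hform,
        ih (f.foldl pvB_build (d, c)).1 (f.foldl pvB_build (d, c)).2 _ hI1]
    have hrow : f.map (fun p => ((f.foldl pvB_build (d, c)).1.get? p).getD 0)
        = f.map (fun p =>
            (((f :: forms).foldl (fun st form => form.foldl pvB_build st) (d, c)).1.get? p).getD 0) := by
      apply List.map_congr_left
      intro p hp
      have hs := pvB_fold_mem f d c p hI hp
      obtain ⟨v, hv⟩ := Option.isSome_iff_exists.mp hs
      have := pvB_foldAll_mono forms (f.foldl pvB_build (d, c)).1 (f.foldl pvB_build (d, c)).2 p v hI1 hv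
      simp only [List.foldl_cons]
      cases hfb : f.foldl pvB_build (d, c) with
      | mk d1 c1 =>
        rw [hfb] at hv this
        simp [hv, this]
    rw [hrow]
    simp [List.append_assoc]

theorem pvDInv_empty : pvDInv (PySem.Dict.empty : PySem.Dict Int Int) := by
  intro x; simp [PySem.Dict.get?_empty]

-- ===== VERDICT (by name: the statement is the Claim_ definition above) =====
theorem get_preprocessed_formulas_spec : Claim_equal_get_preprocessed_formulas := by
  intro sub_formulas _
  unfold Spec_get_preprocessed_formulas get_preprocessed_formulas get_preprocessed_formulas_alt
  have := pvA_outer_eq sub_formulas PySem.Dict.empty 1 [] pvDInv_empty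
  simp only [List.length_nil, Int.natCast_zero, List.nil_append] at this
  rw [this]
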